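-- pv_equiv track=rewrite | github.com/ksator024/AoC | day5_part2.py | checkSublist
-- ===== SOURCE A (Python) =====
-- def checkSublist(key,vorList,backList, rules):
--     if key in rules:
--         for number in vorList:
--             if not number in rules[key]:
--                 return False
--         for number in backList:
--             if number in rules[key]:
--                 return False
--     return True
-- ===== SOURCE B (Python) =====
-- def checkSublist(key, vorList, backList, rules):
--     if key not in rules:
--         return True
--     need = set(vorList)
--     bad = set(backList)
--     for x in rules[key]:
--         if x in bad:
--             return False
--         need.discard(x)
--     return not need
-- ===== Notes on version B (the rewrite author's own statement) =====
-- stated objective: alternative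
-- what changed: Inverts the traversal: instead of scanning vorList and backList with membership tests against rules[key], B makes a single pass over rules[key] itself, failing early on any backList element and discarding satisfied vorList requirements from a 'need' set, succeeding iff 'need' is exhausted.
import Mathlib
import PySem

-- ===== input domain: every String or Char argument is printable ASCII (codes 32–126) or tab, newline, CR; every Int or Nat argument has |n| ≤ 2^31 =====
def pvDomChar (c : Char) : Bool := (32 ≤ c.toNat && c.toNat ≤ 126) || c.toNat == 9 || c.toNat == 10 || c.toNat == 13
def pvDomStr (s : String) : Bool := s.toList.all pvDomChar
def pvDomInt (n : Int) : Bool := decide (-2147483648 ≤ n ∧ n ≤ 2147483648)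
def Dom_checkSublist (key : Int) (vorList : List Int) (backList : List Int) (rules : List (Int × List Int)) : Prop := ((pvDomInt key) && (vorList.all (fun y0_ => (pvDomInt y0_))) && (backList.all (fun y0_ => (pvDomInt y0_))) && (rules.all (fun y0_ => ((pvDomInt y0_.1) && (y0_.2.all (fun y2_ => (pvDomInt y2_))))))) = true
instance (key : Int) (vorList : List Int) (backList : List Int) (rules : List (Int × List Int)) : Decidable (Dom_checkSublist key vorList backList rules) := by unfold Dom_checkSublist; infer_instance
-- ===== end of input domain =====

-- B inverts the traversal: a single pass over rules[key], failing early on backList elements and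
-- discarding satisfied vorList requirements from a 'need' set (objective: alternative decomposition).
-- ===== PORT A =====
-- second loop of A: for number in backList: if number in rules[key]: return False
def pvLoopBack (r : List Int) : List Int → Bool
  | [] => true
  | n :: rest => if r.contains n then false else pvLoopBack r rest

-- first loop of A: for number in vorList: if not number in rules[key]: return False
def pvLoopVor (r : List Int) (back : List Int) : List Int → Bool
  | [] => pvLoopBack r back
  | n :: rest => if !(r.contains n) then false else pvLoopVor r back rest

def checkSublist (key : Int) (vorList : List Int) (backList : List Int) (rules : List (Int × List Int)) : Bool :=
  match (PySem.Dict.mk rules).get? key with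
  | some r => pvLoopVor r backList vorList
  | none => true

-- ===== PORT B =====
-- for x in rules[key]: if x in bad: return False; need.discard(x) — then 'return not need'
def pvScanRule (need : PySem.Set Int) (bad : PySem.Set Int) : List Int → Bool
  | [] => need.isEmpty
  | x :: rest => if PySem.Set.contains bad x then false
                 else pvScanRule (PySem.Set.discard need x) bad rest

def checkSublist_alt (key : Int) (vorList : List Int) (backList : List Int) (rules : List (Int × List Int)) : Bool :=
  match (PySem.Dict.mk rules).get? key with
  | some r => pvScanRule (PySem.Set.ofList vorList) (PySem.Set.ofList backList) r
  | none => true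

-- ===== PRECONDITION & SPEC =====
def Spec_checkSublist (key : Int) (vorList : List Int) (backList : List Int) (rules : List (Int × List Int)) (out : Bool) : Prop := out = checkSublist_alt key vorList backList rules
instance (key : Int) (vorList : List Int) (backList : List Int) (rules : List (Int × List Int)) (out : Bool) : Decidable (Spec_checkSublist key vorList backList rules out) := by unfold Spec_checkSublist; infer_instance

-- ===== CLAIM =====
def Claim_equal_checkSublist : Prop := ∀ (key : Int) (vorList : List Int) (backList : List Int) (rules : List (Int × List Int)), Dom_checkSublist key vorList backList rules → Spec_checkSublist key vorList backList rules (checkSublist key vorList backList rules)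

-- ===== LEMMAS AND PROOFS =====

lemma pvLoopBack_eq (r : List Int) (back : List Int) :
    pvLoopBack r back = back.all (fun n => !r.contains n) := by
  induction back with
  | nil => rfl
  | cons n rest ih => simp [pvLoopBack, ih]

lemma pvLoopVor_eq (r : List Int) (back : List Int) (vor : List Int) :
    pvLoopVor r back vor = (vor.all r.contains && pvLoopBack r back) := by
  induction vor with
  | nil => rfl
  | cons n rest ih => simp [pvLoopVor, ih, Bool.and_assoc]

lemma pvDiscardAll (need : PySem.Set Int) (x : Int) (rest : List Int) :
    List.all (PySem.Set.discard need x) rest.contains = List.all need (x :: rest).contains := by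
  rw [Bool.eq_iff_iff]
  simp only [List.all_eq_true, PySem.Set.mem_discard,
    List.contains_eq_mem, List.mem_cons, decide_eq_true_eq]
  constructor
  · intro h1 y hy
    by_cases hyx : y = x
    · exact Or.inl hyx
    · exact Or.inr (h1 y ⟨hy, hyx⟩)
  · intro h1 y hy
    rcases h1 y hy.1 with h0 | h0
    · exact absurd h0 hy.2
    · exact h0

lemma pvScanRule_eq (bad : PySem.Set Int) (r : List Int) (need : PySem.Set Int) :
    pvScanRule need bad r
      = (need.all r.contains && r.all (fun x => !PySem.Set.contains bad x)) := by
  induction r generalizing need with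
  | nil =>
      rw [Bool.eq_iff_iff]
      simp [pvScanRule, List.all_eq_true, List.isEmpty_iff,
        List.eq_nil_iff_forall_not_mem]
  | cons x rest ih =>
      by_cases hb : x ∈ bad
      · simp [pvScanRule, hb]
      · have hb' : PySem.Set.contains bad x = false := by simpa using hb
        simp [pvScanRule, ih, pvDiscardAll, Bool.and_left_comm]

-- ===== VERDICT =====
theorem checkSublist_spec : Claim_equal_checkSublist := by
  intro key vorList backList rules _
  unfold Spec_checkSublist checkSublist checkSublist_alt
  cases h : (PySem.Dict.mk rules).get? key with
  | none => rfl
  | some r =>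
      show pvLoopVor r backList vorList
        = pvScanRule (PySem.Set.ofList vorList) (PySem.Set.ofList backList) r
      rw [pvLoopVor_eq, pvLoopBack_eq, pvScanRule_eq, Bool.eq_iff_iff]
      simp only [Bool.and_eq_true, List.all_eq_true, PySem.Set.mem_ofList,
        Bool.not_eq_true', List.contains_eq_mem,
        PySem.Set.contains_eq_listContains, decide_eq_true_eq, decide_eq_false_iff_not]
      constructor
      · rintro ⟨h1, h2⟩
        refine ⟨h1, fun x hx hxb => ?_⟩
        exact absurd hx (by simpa using h2 x hxb)
      · rintro ⟨h1, h2⟩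
        refine ⟨h1, fun n hn => ?_⟩
        by_cases hc : n ∈ r
        · exact absurd hn (h2 n hc)
        · simpa using hc
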